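-- pv_equiv track=rewrite | github.com/PyWavelets/pywt | doc/source/pyplots/plot_2d_bases.py | wavedec2_keys
-- ===== SOURCE A (Python) =====
-- def wavedec2_keys(level):
--     """Subband keys corresponding to a wavedec2 decomposition."""
--     approx = ''
--     coeffs = {}
--     for lev in range(level):
--         for k in ['a', 'h', 'v', 'd']:
--             coeffs[approx + k] = None
--         approx = 'a' * (lev + 1)
--         if lev < level - 1:
--             coeffs.pop(approx)
--     return list(coeffs.keys())
-- ===== SOURCE B (Python) =====
-- def wavedec2_keys(level):
--     """Subband keys corresponding to a wavedec2 decomposition."""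
--     keys = ['a' * lev + k for lev in range(level) for k in 'hvd']
--     if level > 0:
--         keys.insert(3 * (level - 1), 'a' * level)
--     return keys
-- ===== Notes on version B (the rewrite author's own statement) =====
-- stated objective: simpler
-- what changed: Replaces A's dict-as-ordered-set (insert four keys per level, then pop the approximation key back out on every non-final level) with a direct construction: one comprehension producing the detail keys in order, plus a single list.insert of the final approximation key; no dict and no add-then-pop remain.
import Mathlib
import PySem

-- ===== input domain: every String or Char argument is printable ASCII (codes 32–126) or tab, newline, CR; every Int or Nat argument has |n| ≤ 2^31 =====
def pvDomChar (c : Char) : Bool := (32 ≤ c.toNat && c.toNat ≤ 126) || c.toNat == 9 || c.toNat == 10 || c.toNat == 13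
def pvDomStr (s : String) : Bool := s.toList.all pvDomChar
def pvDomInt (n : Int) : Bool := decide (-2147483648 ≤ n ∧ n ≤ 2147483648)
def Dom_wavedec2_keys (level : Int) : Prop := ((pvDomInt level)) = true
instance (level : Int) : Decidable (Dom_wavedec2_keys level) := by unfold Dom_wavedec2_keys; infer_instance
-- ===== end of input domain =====

-- B builds the ordered key list directly (one comprehension plus one list.insert) instead of A's
-- dict-as-ordered-set with add-then-pop; objective: simpler, same order of work.

-- ===== PORT A =====
-- loop body of A's 'for lev in range(level)' (dict values are Python None = Option Unit's none)
def stepA (level : Int) (st : String × PySem.Dict String (Option Unit)) (lev : Int) :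
    String × PySem.Dict String (Option Unit) :=
  -- for k in ['a','h','v','d']: coeffs[approx + k] = None
  let coeffs := ["a", "h", "v", "d"].foldl (fun c k => c.insert (st.1 ++ k) none) st.2
  -- approx = 'a' * (lev + 1)   ('a'*n ported as ofList/replicate; toNat clamps at 0 exactly as Python's repeat does)
  let approx := String.ofList (List.replicate (lev + 1).toNat 'a')
  let coeffs :=
    if lev < level - 1 then
      -- coeffs.pop(approx); the key was inserted in this very iteration, so KeyError is impossible
      match coeffs.pop? approx with
      | some (_, c) => c
      | none => coeffs   -- unreachable
    else coeffs
  (approx, coeffs)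

def wavedec2_keys (level : Int) : List String :=
  ((PySem.List.pyRange 0 level 1).foldl (stepA level) ("", PySem.Dict.empty)).2.keys

-- ===== PORT B =====
def wavedec2_keys_alt (level : Int) : List String :=
  -- keys = ['a' * lev + k for lev in range(level) for k in 'hvd']  ('a'*lev + k ported as ofList of replicate ++ [k], exact)
  let keys := (PySem.List.pyRange 0 level 1).flatMap
    (fun lev => "hvd".toList.map (fun k => String.ofList (List.replicate lev.toNat 'a' ++ [k])))
  if 0 < level then
    -- keys.insert(3 * (level - 1), 'a' * level)
    PySem.List.insert keys (3 * (level - 1)) (String.ofList (List.replicate level.toNat 'a'))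
  else keys

-- ===== PRECONDITION & SPEC =====
def Spec_wavedec2_keys (level : Int) (out : List String) : Prop := out = wavedec2_keys_alt level
instance (level : Int) (out : List String) : Decidable (Spec_wavedec2_keys level out) := by unfold Spec_wavedec2_keys; infer_instance

-- ===== CLAIM (what is proved, stated in full; the proofs are below) =====
def Claim_equal_wavedec2_keys : Prop := ∀ (level : Int), Dom_wavedec2_keys level → Spec_wavedec2_keys level (wavedec2_keys level)

-- ===== LEMMAS AND PROOFS =====

-- the subband key 'a'*j + c
def keyA (j : Nat) (c : Char) : String := String.ofList (List.replicate j 'a' ++ [c])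

def keyAP (p : Nat × Char) : String := keyA p.1 p.2

-- (level, subband) pairs of the detail keys of the first m levels
def pvPairs (m : Nat) : List (Nat × Char) := (List.range m).flatMap (fun j => [(j,'h'),(j,'v'),(j,'d')])

-- dict contents after the first m (non-final) iterations of A's loop
def detItems (m : Nat) : List (String × Option Unit) := (pvPairs m).map (fun p => (keyAP p, none))

def detKeys (m : Nat) : List String := (pvPairs m).map keyAP

lemma keyA_inj {j j' : Nat} {c c' : Char} (h : keyA j c = keyA j' c') : j = j' ∧ c = c' := by
  have h' := congrArg String.toList h
  simp only [keyA] at h'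
  simp at h'
  exact h'

lemma keyA_ne (j j' : Nat) {c c' : Char} (h : c ≠ c') : keyA j c ≠ keyA j' c' :=
  fun he => h (keyA_inj he).2

lemma keyAP_injective : Function.Injective keyAP := by
  intro p q h
  obtain ⟨h1, h2⟩ := keyA_inj h
  exact Prod.ext h1 h2

lemma ofList_append_key (m : Nat) (c : Char) :
    String.ofList (List.replicate m 'a') ++ String.ofList [c] = keyA m c := by
  simp [keyA]

lemma keyA_a (m : Nat) : keyA m 'a' = String.ofList (List.replicate (m + 1) 'a') := by
  rw [keyA, List.replicate_succ']

lemma pvPairs_succ (m : Nat) : pvPairs (m + 1) = pvPairs m ++ [(m,'h'),(m,'v'),(m,'d')] := by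
  simp [pvPairs, List.range_succ]

lemma mem_pvPairs_lt {p : Nat × Char} {m : Nat} (hp : p ∈ pvPairs m) : p.1 < m := by
  simp only [pvPairs, List.mem_flatMap, List.mem_range] at hp
  obtain ⟨j, hj, hmem⟩ := hp
  simp only [List.mem_cons, List.not_mem_nil, or_false] at hmem
  rcases hmem with rfl | rfl | rfl <;> exact hj

lemma nodup_pvPairs (m : Nat) : (pvPairs m).Nodup := by
  induction m with
  | zero => simp [pvPairs]
  | succ m ih =>
    rw [pvPairs_succ]
    refine ih.append (by simp) ?_
    intro p hp hq
    have h1 := mem_pvPairs_lt hp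
    simp only [List.mem_cons, List.not_mem_nil, or_false] at hq
    rcases hq with rfl | rfl | rfl <;> exact absurd h1 (lt_irrefl _)

lemma nodup_fullPairs (m : Nat) : (pvPairs m ++ [(m,'a'),(m,'h'),(m,'v'),(m,'d')]).Nodup := by
  refine (nodup_pvPairs m).append (by simp) ?_
  intro p hp hq
  have h1 := mem_pvPairs_lt hp
  simp only [List.mem_cons, List.not_mem_nil, or_false] at hq
  rcases hq with rfl | rfl | rfl | rfl <;> exact absurd h1 (lt_irrefl _)

lemma detItems_succ (m : Nat) :
    detItems (m + 1) = detItems m ++ [(keyA m 'h', none), (keyA m 'v', none), (keyA m 'd', none)] := by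
  simp [detItems, pvPairs_succ, keyAP]

lemma detKeys_succ (m : Nat) :
    detKeys (m + 1) = detKeys m ++ [keyA m 'h', keyA m 'v', keyA m 'd'] := by
  simp [detKeys, pvPairs_succ, keyAP]

lemma detKeys_eq_map_fst (m : Nat) : (detItems m).map (fun x => x.1) = detKeys m := by
  simp [detItems, detKeys, List.map_map, Function.comp_def]

lemma length_pvPairs (m : Nat) : (pvPairs m).length = 3 * m := by
  induction m with
  | zero => simp [pvPairs]
  | succ m ih => rw [pvPairs_succ]; simp [ih]; ring

lemma length_detKeys (m : Nat) : (detKeys m).length = 3 * m := by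
  simp [detKeys, length_pvPairs]

lemma mem_detItems {p : String × Option Unit} {m : Nat} (hp : p ∈ detItems m) :
    ∃ j < m, ∃ c : Char, p = (keyA j c, none) := by
  simp only [detItems, List.mem_map] at hp
  obtain ⟨q, hq, rfl⟩ := hp
  exact ⟨q.1, mem_pvPairs_lt hq, q.2, rfl⟩

lemma contains_false (m : Nat) (c : Char) :
    (PySem.Dict.mk (detItems m)).contains (keyA m c) = false := by
  rw [PySem.Dict.contains_mk]
  rw [List.any_eq_false]
  intro p hp
  obtain ⟨j, hj, c', rfl⟩ := mem_detItems hp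
  simp only [beq_iff_eq]
  exact fun h => absurd (keyA_inj h).1 (Nat.ne_of_lt hj)

lemma nodup_keysfull (m : Nat) :
    (PySem.Dict.mk (detItems m ++
      [(keyA m 'a', none), (keyA m 'h', none), (keyA m 'v', none), (keyA m 'd', none)])).keys.Nodup := by
  rw [PySem.Dict.keys_mk]
  have he : List.map (fun x => x.1) (detItems m ++
      [(keyA m 'a', (none : Option Unit)), (keyA m 'h', none), (keyA m 'v', none), (keyA m 'd', none)]) =
      (pvPairs m ++ [(m,'a'),(m,'h'),(m,'v'),(m,'d')]).map keyAP := by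
    simp [detItems, List.map_map, Function.comp_def, keyAP]
  rw [he]
  exact (nodup_fullPairs m).map keyAP_injective

lemma nodup_key4 (m : Nat) : ([keyA m 'a', keyA m 'h', keyA m 'v', keyA m 'd'] : List String).Nodup := by
  have hp : ([(m,'a'),(m,'h'),(m,'v'),(m,'d')] : List (Nat × Char)).Nodup := by simp
  have he : ([keyA m 'a', keyA m 'h', keyA m 'v', keyA m 'd'] : List String) =
      ([(m,'a'),(m,'h'),(m,'v'),(m,'d')] : List (Nat × Char)).map keyAP := rfl
  rw [he]
  exact hp.map keyAP_injective

lemma fold4_eq (m : Nat) :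
    (["a", "h", "v", "d"].foldl
      (fun c k => c.insert (String.ofList (List.replicate m 'a') ++ k) (none : Option Unit))
      (PySem.Dict.mk (detItems m))) =
    PySem.Dict.mk (detItems m ++
      [(keyA m 'a', none), (keyA m 'h', none), (keyA m 'v', none), (keyA m 'd', none)]) := by
  have ea : String.ofList (List.replicate m 'a') ++ "a" = keyA m 'a' := ofList_append_key m 'a'
  have eh : String.ofList (List.replicate m 'a') ++ "h" = keyA m 'h' := ofList_append_key m 'h'
  have ev : String.ofList (List.replicate m 'a') ++ "v" = keyA m 'v' := ofList_append_key m 'v'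
  have ed : String.ofList (List.replicate m 'a') ++ "d" = keyA m 'd' := ofList_append_key m 'd'
  have hmap : List.map (fun k => String.ofList (List.replicate m 'a') ++ k) ["a", "h", "v", "d"] =
      [keyA m 'a', keyA m 'h', keyA m 'v', keyA m 'd'] := by
    simp only [List.map_cons, List.map_nil]
    rw [ea, eh, ev, ed]
  have hfresh : ∀ a ∈ (["a", "h", "v", "d"] : List String),
      (PySem.Dict.mk (detItems m)).contains (String.ofList (List.replicate m 'a') ++ a) = false := by
    intro a ha
    fin_cases ha
    · rw [ea]; exact contains_false m 'a'
    · rw [eh]; exact contains_false m 'h'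
    · rw [ev]; exact contains_false m 'v'
    · rw [ed]; exact contains_false m 'd'
  have hnd : (List.map (fun k => String.ofList (List.replicate m 'a') ++ k) ["a", "h", "v", "d"]).Nodup := by
    rw [hmap]; exact nodup_key4 m
  apply PySem.Dict.ext
  rw [PySem.Dict.items_foldl_insert_fresh (l := ["a", "h", "v", "d"])
    (k := fun k => String.ofList (List.replicate m 'a') ++ k) (v := fun _ => (none : Option Unit))
    (d := PySem.Dict.mk (detItems m)) hfresh hnd]
  show detItems m ++ _ = detItems m ++ _
  congr 1
  simp only [List.map_cons, List.map_nil]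
  rw [ea, eh, ev, ed]

lemma herase (m : Nat) :
    (PySem.Dict.mk (detItems m ++
      [(keyA m 'a', none), (keyA m 'h', none), (keyA m 'v', none), (keyA m 'd', none)])).erase (keyA m 'a') =
    PySem.Dict.mk (detItems (m + 1)) := by
  apply PySem.Dict.ext
  simp only [PySem.Dict.erase]
  rw [List.filter_append]
  have h1 : (detItems m).filter (fun p => !(p.1 == keyA m 'a')) = detItems m := by
    apply List.filter_eq_self.mpr
    intro p hp
    obtain ⟨j, hj, c', rfl⟩ := mem_detItems hp
    rw [Bool.not_eq_true', beq_eq_false_iff_ne]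
    exact fun h => absurd (keyA_inj h).1 (Nat.ne_of_lt hj)
  rw [h1]
  have ha : (keyA m 'a' == keyA m 'a') = true := beq_self_eq_true _
  have hh : (keyA m 'h' == keyA m 'a') = false := beq_eq_false_iff_ne.mpr (keyA_ne m m (by decide))
  have hv : (keyA m 'v' == keyA m 'a') = false := beq_eq_false_iff_ne.mpr (keyA_ne m m (by decide))
  have hd : (keyA m 'd' == keyA m 'a') = false := beq_eq_false_iff_ne.mpr (keyA_ne m m (by decide))
  rw [detItems_succ]
  simp [List.filter, hh, hv, hd]

lemma stepA_eq (level : Int) (m : Nat) :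
    stepA level (String.ofList (List.replicate m 'a'), PySem.Dict.mk (detItems m)) (m : Int) =
      (keyA m 'a',
        if (m : Int) < level - 1 then PySem.Dict.mk (detItems (m + 1))
        else PySem.Dict.mk (detItems m ++
          [(keyA m 'a', none), (keyA m 'h', none), (keyA m 'v', none), (keyA m 'd', none)])) := by
  simp only [stepA]
  rw [fold4_eq m]
  rw [show ((m : Int) + 1).toNat = m + 1 by omega]
  rw [show String.ofList (List.replicate (m + 1) 'a') = keyA m 'a' from (keyA_a m).symm]
  by_cases hc : (m : Int) < level - 1
  · rw [if_pos hc, if_pos hc]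
    have hget : (PySem.Dict.mk (detItems m ++
        [(keyA m 'a', none), (keyA m 'h', none), (keyA m 'v', none), (keyA m 'd', none)])).get? (keyA m 'a') =
        some none :=
      PySem.Dict.get?_of_mem_items _ (by simp) (nodup_keysfull m)
    simp only [PySem.Dict.pop?, hget, Option.map_some]
    rw [herase m]
  · rw [if_neg hc, if_neg hc]

lemma loopA (level : Int) (m : Nat) (hm : (m : Int) ≤ level - 1) :
    (PySem.List.pyRange 0 (m : Int) 1).foldl (stepA level) ("", PySem.Dict.empty) =
      (String.ofList (List.replicate m 'a'), PySem.Dict.mk (detItems m)) := by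
  induction m with
  | zero =>
    rw [Nat.cast_zero, PySem.List.pyRange_one_eq_nil le_rfl]
    rfl
  | succ m ih =>
    have h1 : (m : Int) ≤ level - 1 := by push_cast at hm; omega
    rw [show ((m + 1 : Nat) : Int) = (m : Int) + 1 by push_cast; ring,
      PySem.List.pyRange_one_succ_right (by positivity), List.foldl_append, List.foldl_cons,
      List.foldl_nil, ih h1, stepA_eq level m, if_pos (by push_cast at hm; omega), keyA_a]

-- B's comprehension produces exactly the detail keys
lemma altKeys (n : Nat) :
    (PySem.List.pyRange 0 (n : Int) 1).flatMap
      (fun lev => "hvd".toList.map (fun k => String.ofList (List.replicate lev.toNat 'a' ++ [k]))) =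
    detKeys n := by
  induction n with
  | zero => rw [Nat.cast_zero, PySem.List.pyRange_one_eq_nil le_rfl]; rfl
  | succ n ih =>
    rw [show ((n + 1 : Nat) : Int) = (n : Int) + 1 by push_cast; ring,
      PySem.List.pyRange_one_succ_right (by positivity), List.flatMap_append, ih, detKeys_succ]
    congr 1

-- ===== VERDICT (by name: the statement is the Claim_ definition above) =====
theorem wavedec2_keys_spec : Claim_equal_wavedec2_keys := by
  intro level _
  unfold Spec_wavedec2_keys wavedec2_keys wavedec2_keys_alt
  by_cases hpos : 0 < level
  · -- level ≥ 1
    set m : Nat := (level - 1).toNat with hmdef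
    have hm : (m : Int) = level - 1 := by omega
    have hln : level.toNat = m + 1 := by omega
    have hsplit : PySem.List.pyRange 0 level 1 = PySem.List.pyRange 0 (m : Int) 1 ++ [(m : Int)] := by
      rw [show level = (m : Int) + 1 by omega]
      exact PySem.List.pyRange_one_succ_right (by positivity)
    rw [hsplit, List.foldl_append, List.foldl_cons, List.foldl_nil,
      loopA level m (by omega), stepA_eq level m,
      if_neg (show ¬ ((m : Int) < level - 1) by omega)]
    -- B's side
    have hB : (PySem.List.pyRange 0 (m : Int) 1 ++ [(m : Int)]).flatMap
        (fun lev => "hvd".toList.map (fun k => String.ofList (List.replicate lev.toNat 'a' ++ [k]))) =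
        detKeys (m + 1) := by
      rw [← PySem.List.pyRange_one_succ_right (show (0 : Int) ≤ (m : Int) by positivity),
        show ((m : Int) + 1) = ((m + 1 : Nat) : Int) by push_cast; ring]
      exact altKeys (m + 1)
    rw [hB, if_pos hpos,
      show (3 * (level - 1) : Int) = ((3 * m : Nat) : Int) by omega]
    rw [PySem.List.insert_natCast]
    all_goals first
    | (rw [detKeys_succ,
          show (3 * m) = (detKeys m).length from (length_detKeys m).symm,
          List.take_left, List.drop_left];
       simp only [PySem.Dict.keys_mk, List.map_append, detKeys_eq_map_fst, List.map_cons,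
          List.map_nil];
       rw [hln, ← keyA_a])
    | (rw [length_detKeys]; omega)
  · -- level ≤ 0: both sides are []
    have h0 : level ≤ 0 := by omega
    rw [PySem.List.pyRange_one_eq_nil h0]
    simp [hpos]
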